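-- pv_equiv track=rewrite | github.com/jacobsvennevik/Bio-inspired-spike-based-Hippocampus-and-Posterior-Parietal-Cortex-robotic-system-for-pseudo-mapping | real_time_map_and_nav_pynn.py | manhattan_nearest_cell_to_target
-- ===== SOURCE A (Python) =====
-- from typing import List, Tuple
--
-- def manhattan_nearest_cell_to_target(target: Tuple[int, int], cells: List[Tuple[int, int]]) -> List[Tuple[int, int]]:
--     """Get list of cells with the nearest distance to the target with manhattan distance."""
--     nearest_cells: List[Tuple[int, int]] = []
--     nearest_distance = -1
--     for cell in cells:
--         distance = abs(cell[0] - target[0]) + abs(cell[1] - target[1])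
--         if nearest_distance == -1 or distance <= nearest_distance:
--             if distance == nearest_distance:
--                 nearest_cells.append(cell)
--             else:
--                 nearest_cells = [cell]
--             nearest_distance = distance
--     return nearest_cells
-- ===== SOURCE B (Python) =====
-- from typing import List, Tuple
--
-- def manhattan_nearest_cell_to_target(target: Tuple[int, int], cells: List[Tuple[int, int]]) -> List[Tuple[int, int]]:
--     """Two-pass version: compute the minimum Manhattan distance, then filter."""
--     if not cells:
--         return []
--     min_dist = min(abs(c[0] - target[0]) + abs(c[1] - target[1]) for c in cells)
--     return [c for c in cells
--             if abs(c[0] - target[0]) + abs(c[1] - target[1]) == min_dist]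
-- ===== Notes on version B (the rewrite author's own statement) =====
-- stated objective: simpler
-- what changed: A's single stateful loop (accumulator list reset on strictly smaller distance, appended on tie, sentinel -1) is replaced by a min-pass followed by a filter comprehension.
import Mathlib
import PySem

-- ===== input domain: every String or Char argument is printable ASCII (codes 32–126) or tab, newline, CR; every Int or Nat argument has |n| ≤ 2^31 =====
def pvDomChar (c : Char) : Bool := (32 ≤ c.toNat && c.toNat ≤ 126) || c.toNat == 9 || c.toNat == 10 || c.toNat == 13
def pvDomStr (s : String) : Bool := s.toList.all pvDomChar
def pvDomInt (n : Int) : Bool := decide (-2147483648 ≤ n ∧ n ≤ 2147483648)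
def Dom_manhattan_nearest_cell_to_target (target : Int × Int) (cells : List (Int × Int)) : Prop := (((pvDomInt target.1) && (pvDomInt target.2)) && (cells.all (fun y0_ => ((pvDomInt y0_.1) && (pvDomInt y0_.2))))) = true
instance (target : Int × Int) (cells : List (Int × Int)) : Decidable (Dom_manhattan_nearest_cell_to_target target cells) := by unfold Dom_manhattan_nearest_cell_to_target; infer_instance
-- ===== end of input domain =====

-- B replaces A's single stateful loop (reset-on-smaller/append-on-tie accumulator with a -1
-- sentinel) by a min-pass followed by a filter pass; objective: simpler.

-- ===== PORT A =====
-- A's loop, step for step: state = (nearest_cells, nearest_distance)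
def pvALoop (target : Int × Int) : List (Int × Int) → List (Int × Int) → Int → List (Int × Int)
  | [], acc, _ => acc
  | c :: cs, acc, nd =>
    let distance := |c.1 - target.1| + |c.2 - target.2|
    if nd = -1 ∨ distance ≤ nd then
      if distance = nd then pvALoop target cs (acc ++ [c]) nd
      else pvALoop target cs [c] distance
    else pvALoop target cs acc nd

def manhattan_nearest_cell_to_target (target : Int × Int) (cells : List (Int × Int)) : List (Int × Int) :=
  pvALoop target cells [] (-1)

-- ===== PORT B =====
def pvDist (target c : Int × Int) : Int := |c.1 - target.1| + |c.2 - target.2|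

def manhattan_nearest_cell_to_target_alt (target : Int × Int) (cells : List (Int × Int)) : List (Int × Int) :=
  match cells with
  | [] => []
  | c :: cs =>
    -- min(... for c in cells): fold of min over the nonempty list of distances
    let min_dist := cs.foldl (fun a x => min a (pvDist target x)) (pvDist target c)
    (c :: cs).filter (fun x => pvDist target x = min_dist)

-- ===== PRECONDITION & SPEC =====
def Spec_manhattan_nearest_cell_to_target (target : Int × Int) (cells : List (Int × Int)) (out : List (Int × Int)) : Prop := out = manhattan_nearest_cell_to_target_alt target cells
instance (target : Int × Int) (cells : List (Int × Int)) (out : List (Int × Int)) : Decidable (Spec_manhattan_nearest_cell_to_target target cells out) := by unfold Spec_manhattan_nearest_cell_to_target; infer_instance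

-- ===== CLAIM (what is proved, stated in full; the proofs are below) =====
def Claim_equal_manhattan_nearest_cell_to_target : Prop := ∀ (target : Int × Int) (cells : List (Int × Int)), Dom_manhattan_nearest_cell_to_target target cells → Spec_manhattan_nearest_cell_to_target target cells (manhattan_nearest_cell_to_target target cells)

-- ===== LEMMAS AND PROOFS =====

-- Characterisation of A's loop from a non-negative current best nd:
-- the result is acc (kept iff the minimum does not improve) followed by the
-- cells of cs achieving the overall minimum m = min(nd, distances of cs).
theorem pv_foldl_min_le (target : Int × Int) :
    ∀ (cs : List (Int × Int)) (nd : Int),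
      cs.foldl (fun a x => min a (pvDist target x)) nd ≤ nd := by
  intro cs
  induction cs with
  | nil => intro nd; simp
  | cons c cs ih =>
    intro nd
    calc (c :: cs).foldl (fun a x => min a (pvDist target x)) nd
        = cs.foldl (fun a x => min a (pvDist target x)) (min nd (pvDist target c)) := rfl
      _ ≤ min nd (pvDist target c) := ih _
      _ ≤ nd := min_le_left _ _

theorem pvALoop_spec (target : Int × Int) (cs : List (Int × Int)) :
    ∀ (acc : List (Int × Int)) (nd : Int), 0 ≤ nd →
    pvALoop target cs acc nd =
      (if cs.foldl (fun a x => min a (pvDist target x)) nd = nd then acc else []) ++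
        cs.filter (fun x => pvDist target x = cs.foldl (fun a x => min a (pvDist target x)) nd) := by
  induction cs with
  | nil => intro acc nd _; simp [pvALoop]
  | cons c cs ih =>
    intro acc nd hnd
    have hd : (0:Int) ≤ pvDist target c := by
      have := abs_nonneg (c.1 - target.1); have := abs_nonneg (c.2 - target.2)
      unfold pvDist; omega
    have hpd : |c.1 - target.1| + |c.2 - target.2| = pvDist target c := rfl
    simp only [pvALoop, List.foldl_cons, List.filter_cons, hpd]
    rcases lt_trichotomy (pvDist target c) nd with h | h | h
    · -- strictly smaller: reset
      have hne : ¬ pvDist target c = nd := ne_of_lt h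
      have hle : pvDist target c ≤ nd := le_of_lt h
      rw [if_pos (Or.inr hle), if_neg hne]; simp only [min_eq_right hle]; rw [ih [c] (pvDist target c) hd]
      have hm := pv_foldl_min_le target cs (pvDist target c)
      have hmnd : ¬ cs.foldl (fun a x => min a (pvDist target x)) (pvDist target c) = nd := by omega
      rw [if_neg hmnd]
      by_cases hc : pvDist target c = cs.foldl (fun a x => min a (pvDist target x)) (pvDist target c)
      · rw [if_pos (by omega : cs.foldl (fun a x => min a (pvDist target x)) (pvDist target c) = pvDist target c)]
        simp [← hc]
      · rw [if_neg (fun hh => hc hh.symm)]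
        simp [hc]
    · -- tie: append
      rw [if_pos (Or.inr (le_of_eq h)), if_pos h]; simp only [h, min_self]; rw [ih (acc ++ [c]) nd hnd]
      by_cases hm : cs.foldl (fun a x => min a (pvDist target x)) nd = nd
      · rw [if_pos hm, if_pos hm]
        simp [hm]
      · rw [if_neg hm, if_neg hm]
        have hle := pv_foldl_min_le target cs nd
        have : ¬ pvDist target c = cs.foldl (fun a x => min a (pvDist target x)) nd := by omega
        simp
        omega
    · -- strictly larger: skip
      have h1 : ¬ nd = -1 := by omega
      have h2 : ¬ pvDist target c ≤ nd := not_le_of_gt h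
      rw [if_neg (by push Not; exact ⟨h1, h⟩)]; simp only [min_eq_left (le_of_lt h)]; rw [ih acc nd hnd]
      have hle := pv_foldl_min_le target cs nd
      have : ¬ pvDist target c = cs.foldl (fun a x => min a (pvDist target x)) nd := by omega
      simp [this]

-- ===== VERDICT (by name: the statement is the Claim_ definition above) =====
theorem manhattan_nearest_cell_to_target_spec : Claim_equal_manhattan_nearest_cell_to_target := by
  intro target cells _
  unfold Spec_manhattan_nearest_cell_to_target manhattan_nearest_cell_to_target manhattan_nearest_cell_to_target_alt
  cases cells with
  | nil => rfl
  | cons c cs =>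
    have hd : (0:Int) ≤ pvDist target c := by
      have := abs_nonneg (c.1 - target.1); have := abs_nonneg (c.2 - target.2)
      unfold pvDist; omega
    have hne : ¬ (|c.1 - target.1| + |c.2 - target.2|) = -1 := by
      unfold pvDist at hd; omega
    simp only [pvALoop]
    simp only [true_or, if_true]
    rw [if_neg hne]
    show pvALoop target cs [c] (pvDist target c) = _
    rw [pvALoop_spec target cs [c] (pvDist target c) hd]
    simp only [List.filter_cons]
    by_cases hm : cs.foldl (fun a x => min a (pvDist target x)) (pvDist target c) = pvDist target c
    · rw [if_pos hm]; simp [hm]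
    · rw [if_neg hm]
      have : ¬ pvDist target c = cs.foldl (fun a x => min a (pvDist target x)) (pvDist target c) := fun h => hm h.symm
      simp [this]
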